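-- pv_equiv track=rewrite | github.com/edgewall/trac | trac/wiki/api.py | _resolve_relative_name
-- ===== SOURCE A (Python) =====
-- def _resolve_relative_name(pagename, referrer):
--     base = referrer.split('/')
--     components = pagename.split('/')
--     for i, comp in enumerate(components):
--         if comp == '..':
--             if base:
--                 base.pop()
--         elif comp != '.':
--             base.extend(components[i:])
--             break
--     return '/'.join(base)
-- ===== SOURCE B (Python) =====
-- def _resolve_relative_name(pagename, referrer):
--     base = referrer.split('/')
--     comps = pagename.split('/')
--     i = 0
--     while i < len(comps) and comps[i] in ('.', '..'):
--         i += 1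
--     num_up = comps[:i].count('..')
--     return '/'.join(base[:max(0, len(base) - num_up)] + comps[i:])
-- ===== Notes on version B (the rewrite author's own statement) =====
-- stated objective: simpler
-- what changed: Replaces the per-element pop/extend-and-break mutation loop with a two-phase closed form: scan the leading run of '.'/'..' components, count the '..'s, and build the result as one slice-and-concatenate expression.
import Mathlib
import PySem

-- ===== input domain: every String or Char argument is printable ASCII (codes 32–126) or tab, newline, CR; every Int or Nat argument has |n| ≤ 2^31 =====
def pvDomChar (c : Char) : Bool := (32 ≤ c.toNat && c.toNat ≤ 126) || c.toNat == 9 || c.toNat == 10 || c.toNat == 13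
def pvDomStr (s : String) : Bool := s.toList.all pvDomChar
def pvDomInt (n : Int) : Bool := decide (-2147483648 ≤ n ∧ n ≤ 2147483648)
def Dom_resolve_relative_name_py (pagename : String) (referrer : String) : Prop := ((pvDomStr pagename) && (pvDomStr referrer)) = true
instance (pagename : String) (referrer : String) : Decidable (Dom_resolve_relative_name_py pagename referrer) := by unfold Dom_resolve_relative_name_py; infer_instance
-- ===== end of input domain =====

-- B replaces A's pop/extend-and-break mutation loop with a scan-count-slice closed form (simpler decomposition, same cost).

-- ===== PORT A =====
-- the for-loop over enumerate(components): state is `base`; `comp :: rest` is components[i:] at step i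
def pvALoop (base : List String) : List String → List String
  | [] => base
  | comp :: rest =>
    if comp = ".." then
      -- if base: base.pop()
      pvALoop (if base = [] then base else base.dropLast) rest
    else if comp ≠ "." then
      -- base.extend(components[i:]); break
      base ++ (comp :: rest)
    else
      pvALoop base rest

def resolve_relative_name_py (pagename : String) (referrer : String) : String :=
  let base := (PySem.Str.split? referrer "/").getD []
  let components := (PySem.Str.split? pagename "/").getD []
  PySem.Str.join "/" (pvALoop base components)

-- ===== PORT B =====
-- the while loop of Source B: length of the leading run of '.'/'..' components
def pvBScan : List String → Nat
  | [] => 0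
  | c :: rest => if c = "." ∨ c = ".." then pvBScan rest + 1 else 0

def resolve_relative_name_py_alt (pagename : String) (referrer : String) : String :=
  let base := (PySem.Str.split? referrer "/").getD []
  let comps := (PySem.Str.split? pagename "/").getD []
  let i := pvBScan comps
  let num_up := (comps.take i).count ".."
  -- base[:max(0, len(base) - num_up)]: Nat subtraction is exactly the max-0 clamp
  PySem.Str.join "/" (base.take (base.length - num_up) ++ comps.drop i)

-- ===== PRECONDITION & SPEC =====
def Spec_resolve_relative_name_py (pagename : String) (referrer : String) (out : String) : Prop := out = resolve_relative_name_py_alt pagename referrer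
instance (pagename : String) (referrer : String) (out : String) : Decidable (Spec_resolve_relative_name_py pagename referrer out) := by unfold Spec_resolve_relative_name_py; infer_instance

-- ===== CLAIM (what is proved, stated in full; the proofs are below) =====
def Claim_equal_resolve_relative_name_py : Prop := ∀ (pagename : String) (referrer : String), Dom_resolve_relative_name_py pagename referrer → Spec_resolve_relative_name_py pagename referrer (resolve_relative_name_py pagename referrer)

-- ===== LEMMAS AND PROOFS =====

theorem pvALoop_eq (comps : List String) : ∀ (base : List String),
    pvALoop base comps =
      base.take (base.length - (comps.take (pvBScan comps)).count "..") ++ comps.drop (pvBScan comps) := by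
  induction comps with
  | nil => intro base; simp [pvALoop, pvBScan]
  | cons c rest ih =>
    intro base
    by_cases h2 : c = ".."
    · subst h2
      rw [show pvALoop base (".." :: rest)
            = pvALoop (if base = [] then base else base.dropLast) rest from by simp [pvALoop]]
      rw [ih]
      have h1 : pvBScan (".." :: rest) = pvBScan rest + 1 := by simp [pvBScan]
      rw [h1]
      by_cases hb : base = []
      · simp [hb]
      · simp only [if_neg hb, List.take_succ_cons, List.count_cons, List.drop_succ_cons,
          List.dropLast_eq_take, List.take_take, List.length_take, beq_self_eq_true]
        congr 2
        simp only [if_true]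
        omega
    · by_cases h1 : c = "."
      · subst h1
        rw [show pvALoop base ("." :: rest) = pvALoop base rest from by simp [pvALoop]]
        rw [ih]
        have hs : pvBScan ("." :: rest) = pvBScan rest + 1 := by simp [pvBScan]
        rw [hs]
        simp
      · simp [pvALoop, pvBScan, h1, h2]

-- ===== VERDICT (by name: the statement is the Claim_ definition above) =====
theorem resolve_relative_name_py_spec : Claim_equal_resolve_relative_name_py := by
  intro pagename referrer _
  unfold Spec_resolve_relative_name_py resolve_relative_name_py resolve_relative_name_py_alt
  exact congrArg (PySem.Str.join "/") (pvALoop_eq _ _)
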